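-- pv_equiv track=rewrite | github.com/MartinVyskoc/projekt01_analyser | analyzer_M.py | count_numbers_words
-- ===== SOURCE A (Python) =====
-- def count_numbers_words(text):
--     numbers_words = 0
--     numbers_sum = 0
--     for word in text.split():
--         if word.isdigit():
--             numbers_words += 1
--             numbers_sum = numbers_sum + int(word)
--     return numbers_words, numbers_sum
-- ===== SOURCE B (Python) =====
-- def count_numbers_words(text):
--     count = 0
--     total = 0
--     i = 0
--     n = len(text)
--     while i < n:
--         if text[i].isspace():
--             i += 1
--             continue
--         j = i
--         while j < n and not text[j].isspace():
--             j += 1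
--         word = text[i:j]
--         if word.isdigit():
--             count += 1
--             total += int(word)
--         i = j
--     return count, total
-- ===== Notes on version B (the rewrite author's own statement) =====
-- stated objective: alternative
-- what changed: B discards str.split() and the fused counting loop: it tokenizes the string itself with a two-pointer index scan (skip one whitespace char, advance a second index to the end of the word, slice it out), testing isdigit/int per extracted word.
import Mathlib
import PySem

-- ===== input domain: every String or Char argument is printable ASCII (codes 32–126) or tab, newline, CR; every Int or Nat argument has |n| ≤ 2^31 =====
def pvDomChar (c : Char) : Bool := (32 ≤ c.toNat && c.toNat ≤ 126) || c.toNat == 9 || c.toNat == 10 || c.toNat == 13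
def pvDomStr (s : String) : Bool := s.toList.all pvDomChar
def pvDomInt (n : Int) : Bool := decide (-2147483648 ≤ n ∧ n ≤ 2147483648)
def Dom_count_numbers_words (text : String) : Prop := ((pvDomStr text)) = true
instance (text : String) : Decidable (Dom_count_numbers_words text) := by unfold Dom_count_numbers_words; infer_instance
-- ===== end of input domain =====

-- B replaces str.split() plus a fused counting loop by a two-pointer tokenizer that walks the
-- string once by index, slicing each word out itself (alternative decomposition, same cost).
-- ===== PORT A =====
def count_numbers_words (text : String) : Int × Int :=
  (PySem.Str.split₀ text).foldl
    (fun st word =>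
      if PySem.Str.strIsdigit word then
        (st.1 + 1, st.2 + (PySem.Int.ofStr? word).getD 0)
      else st)
    (0, 0)

-- ===== PORT B =====
-- The inner `while j < n and not text[j].isspace(): j += 1` followed by `word = text[i:j]; i = j`
-- is rendered as takeWhile/dropWhile on the remaining characters (exact: it scans the same chars).
def pvGoB : List Char → Int × Int → Int × Int
  | [], st => st
  | c :: rest, st =>
    if PySem.Chars.isspace c then
      pvGoB rest st                                   -- i += 1; continue
    else
      let word := (c :: rest).takeWhile (fun d => !PySem.Chars.isspace d)
      let st' := if PySem.Chars.strIsdigit word then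
                   (st.1 + 1, st.2 + (PySem.Int.ofChars? word).getD 0)
                 else st
      pvGoB ((c :: rest).dropWhile (fun d => !PySem.Chars.isspace d)) st'
  termination_by cs _ => cs.length
  decreasing_by
  · simp only [List.length_cons]
    omega
  · rename_i h
    rw [List.dropWhile_cons, if_pos (by simp [h])]
    simp only [List.length_cons]
    exact Nat.lt_succ_of_le (List.length_dropWhile_le _ _)

def count_numbers_words_alt (text : String) : Int × Int :=
  pvGoB text.toList (0, 0)

-- ===== PRECONDITION & SPEC =====
def Spec_count_numbers_words (text : String) (out : Int × Int) : Prop := out = count_numbers_words_alt text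
instance (text : String) (out : Int × Int) : Decidable (Spec_count_numbers_words text out) := by unfold Spec_count_numbers_words; infer_instance

-- ===== CLAIM (what is proved, stated in full; the proofs are below) =====
def Claim_equal_count_numbers_words : Prop := ∀ (text : String), Dom_count_numbers_words text → Spec_count_numbers_words text (count_numbers_words text)

-- ===== LEMMAS AND PROOFS =====

def pvStepA (st : Int × Int) (w : List Char) : Int × Int :=
  if PySem.Chars.strIsdigit w then (st.1 + 1, st.2 + (PySem.Int.ofChars? w).getD 0) else st

theorem pv_go_acc (cs : List Char) : ∀ cur acc,
    PySem.Chars.split₀.go cs cur acc = acc.reverse ++ PySem.Chars.split₀.go cs cur [] := by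
  induction cs with
  | nil =>
    intro cur acc
    simp [PySem.Chars.split₀.go]
    split <;> simp
  | cons c rest ih =>
    intro cur acc
    simp only [PySem.Chars.split₀.go]
    split
    · split
      · rw [ih _ acc]
      · rw [ih _ (cur.reverse :: acc), ih _ [cur.reverse]]
        simp
    · rw [ih _ acc]

theorem pv_split₀_space {c : Char} (h : PySem.Chars.isspace c = true) (cs : List Char) :
    PySem.Chars.split₀ (c :: cs) = PySem.Chars.split₀ cs := by
  simp [PySem.Chars.split₀, PySem.Chars.split₀.go, h]

theorem pv_go_word (cs : List Char) : ∀ r, r ≠ [] →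
    PySem.Chars.split₀.go cs r [] =
      (r.reverse ++ cs.takeWhile (fun d => !PySem.Chars.isspace d)) ::
        PySem.Chars.split₀ (cs.dropWhile (fun d => !PySem.Chars.isspace d)) := by
  induction cs with
  | nil =>
    intro r hr
    simp [PySem.Chars.split₀.go, PySem.Chars.split₀, hr]
  | cons c rest ih =>
    intro r hr
    by_cases hc : PySem.Chars.isspace c = true
    · have h1 : PySem.Chars.split₀.go (c :: rest) r [] =
          PySem.Chars.split₀.go rest [] [r.reverse] := by
        simp [PySem.Chars.split₀.go, hc, hr]
      rw [h1, pv_go_acc]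
      simp only [List.takeWhile_cons, List.dropWhile_cons, hc, Bool.not_true,
        Bool.false_eq_true, if_false, List.reverse_cons, List.reverse_nil,
        List.nil_append, List.singleton_append, List.append_nil, List.cons.injEq,
        true_and]
      exact (pv_split₀_space hc rest).symm
    · have h1 : PySem.Chars.split₀.go (c :: rest) r [] =
          PySem.Chars.split₀.go rest (c :: r) [] := by
        simp [PySem.Chars.split₀.go, hc]
      rw [h1, ih (c :: r) (by simp)]
      simp [hc]

theorem pv_split₀_word {c : Char} (h : PySem.Chars.isspace c = false) (cs : List Char) :
    PySem.Chars.split₀ (c :: cs) =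
      ((c :: cs).takeWhile (fun d => !PySem.Chars.isspace d)) ::
        PySem.Chars.split₀ ((c :: cs).dropWhile (fun d => !PySem.Chars.isspace d)) := by
  have h1 : PySem.Chars.split₀ (c :: cs) = PySem.Chars.split₀.go cs [c] [] := by
    simp [PySem.Chars.split₀, PySem.Chars.split₀.go, h]
  rw [h1, pv_go_word cs [c] (by simp)]
  simp [h]

theorem pv_goB_eq (cs : List Char) (st : Int × Int) :
    pvGoB cs st = (PySem.Chars.split₀ cs).foldl pvStepA st := by
  induction cs, st using pvGoB.induct with
  | case1 st => simp [pvGoB, PySem.Chars.split₀, PySem.Chars.split₀.go]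
  | case2 c rest st hc ih =>
    rw [pvGoB, if_pos hc, ih, pv_split₀_space hc]
  | case3 c rest st hc word st' ih =>
    rw [pvGoB, if_neg hc]
    exact ih.trans (by
      rw [pv_split₀_word (Bool.eq_false_iff.mpr hc) rest]
      rfl)

-- ===== VERDICT (by name: the statement is the Claim_ definition above) =====
theorem count_numbers_words_spec : Claim_equal_count_numbers_words := by
  intro text _
  unfold Spec_count_numbers_words count_numbers_words count_numbers_words_alt
  rw [pv_goB_eq]
  rw [show PySem.Str.split₀ text = (PySem.Chars.split₀ text.toList).map String.ofList from rfl]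
  rw [List.foldl_map]
  congr 1
  funext st w
  simp [pvStepA, PySem.Str.strIsdigit, PySem.Int.ofStr?]
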